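-- pv_equiv track=rewrite | github.com/hengvt/ProFLingo | attack.py | concat_user_ids
-- ===== SOURCE A (Python) =====
-- def concat_user_ids(begin_ids, prompt_ids, middle_ids, prompt_replace_lst = None):
--     user_ids_lst = []
--     user_ids = begin_ids.copy()
--     replace_slice_lst=[]
--     prompt_slice = slice(len(user_ids), -1)
--     last_slice_stop = len(user_ids)
--     for id in prompt_ids:
--         user_ids += [id]
--         replace_slice_lst.append(slice(last_slice_stop, len(user_ids)))
--         last_slice_stop = len(user_ids)
--     prompt_slice = slice(prompt_slice.start, len(user_ids))
--     user_ids += middle_ids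
--
--     if (prompt_replace_lst == None):
--         return [user_ids]
--
--     for i, repl_lst in enumerate(prompt_replace_lst):
--         for repl_token in repl_lst:
--             cand_user_ids = user_ids.copy()
--             cand_user_ids[replace_slice_lst[i]] = [repl_token]
--             user_ids_lst.append(cand_user_ids)
--
--     return user_ids_lst
-- ===== SOURCE B (Python) =====
-- def concat_user_ids(begin_ids, prompt_ids, middle_ids, prompt_replace_lst = None):
--     if prompt_replace_lst == None:
--         return [begin_ids + list(prompt_ids) + middle_ids]
--     # staged passes: prefixes[i] = begin_ids + prompt_ids[:i] (forward, incremental),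
--     # suffixes[i] = prompt_ids[i:] + middle_ids (backward, incremental)
--     prefixes = [list(begin_ids)]
--     for tok in prompt_ids:
--         prefixes.append(prefixes[-1] + [tok])
--     suffixes = [list(middle_ids)]
--     for tok in reversed(prompt_ids):
--         suffixes.append([tok] + suffixes[-1])
--     suffixes.reverse()
--     out = []
--     for i, repl_lst in enumerate(prompt_replace_lst):
--         for repl_token in repl_lst:
--             out.append(prefixes[i] + [repl_token] + suffixes[i + 1])
--     return out
-- ===== Notes on version B (the rewrite author's own statement) =====
-- stated objective: alternative
-- what changed: Replaces A's base-list-plus-slice-bookkeeping and per-candidate slice-assignment on copies with two staged incremental table passes (forward prefixes, backward suffixes) and assembles each candidate by table lookup prefixes[i] + [token] + suffixes[i+1].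
import Mathlib
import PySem

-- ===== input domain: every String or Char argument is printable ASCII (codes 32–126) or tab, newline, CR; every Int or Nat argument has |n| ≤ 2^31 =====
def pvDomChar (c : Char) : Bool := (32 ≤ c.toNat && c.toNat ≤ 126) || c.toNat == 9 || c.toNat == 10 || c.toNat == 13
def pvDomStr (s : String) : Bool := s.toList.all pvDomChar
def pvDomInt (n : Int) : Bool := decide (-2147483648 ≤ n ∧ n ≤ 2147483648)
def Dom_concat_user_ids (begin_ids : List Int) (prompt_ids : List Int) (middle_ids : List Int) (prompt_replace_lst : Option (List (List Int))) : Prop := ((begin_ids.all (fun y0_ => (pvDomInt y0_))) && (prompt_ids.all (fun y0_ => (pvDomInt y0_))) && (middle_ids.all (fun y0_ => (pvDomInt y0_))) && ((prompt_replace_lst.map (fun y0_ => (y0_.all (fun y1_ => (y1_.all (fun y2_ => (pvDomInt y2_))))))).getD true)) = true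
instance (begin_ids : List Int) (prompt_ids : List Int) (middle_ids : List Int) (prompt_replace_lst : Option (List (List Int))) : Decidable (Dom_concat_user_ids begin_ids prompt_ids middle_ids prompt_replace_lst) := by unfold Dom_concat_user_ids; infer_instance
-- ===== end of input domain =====

-- B replaces A's base list + slice bookkeeping + per-candidate slice-assignment by two staged
-- incremental table passes (forward prefixes, backward suffixes) and assembles each candidate
-- by table lookup (objective: alternative); return values agree on Pre_.

-- ===== PORT A =====
-- first loop: user_ids += [id]; replace_slice_lst.append(slice(last_slice_stop, len(user_ids)))
-- (slices stored as (start, stop) Nat pairs; the dead variable prompt_slice is omitted)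
def concat_user_ids (begin_ids : List Int) (prompt_ids : List Int) (middle_ids : List Int) (prompt_replace_lst : Option (List (List Int))) : List (List Int) :=
  let st := prompt_ids.foldl
    (fun (acc : List Int × List (Nat × Nat)) id =>
      let u := acc.1 ++ [id]
      (u, acc.2 ++ [(acc.1.length, u.length)]))
    (begin_ids, [])
  let user_ids := st.1 ++ middle_ids
  match prompt_replace_lst with
  | none => [user_ids]
  | some L =>
    -- cand_user_ids[replace_slice_lst[i]] = [repl_token]; slices here are in range, ported as take/drop
    (PySem.List.enumerate L).foldl
      (fun acc ir =>
        acc ++ ir.2.map (fun tok =>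
          let s := PySem.List.pyGetD st.2 ir.1 (0, 0)
          user_ids.take s.1 ++ [tok] ++ user_ids.drop s.2))
      []

-- ===== PORT B =====
-- prefixes built forward carrying cur; suffixes built over reversed(prompt_ids) carrying cur,
-- then the collected list is reversed, exactly as in Source B; lookups prefixes[i], suffixes[i+1]
-- (in range under Pre_; out of range Source B raises, excluded by Pre_)
def concat_user_ids_alt (begin_ids : List Int) (prompt_ids : List Int) (middle_ids : List Int) (prompt_replace_lst : Option (List (List Int))) : List (List Int) :=
  match prompt_replace_lst with
  | none => [begin_ids ++ prompt_ids ++ middle_ids]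
  | some L =>
    let preSt := prompt_ids.foldl
      (fun (st : List Int × List (List Int)) tok =>
        let cur := st.1 ++ [tok]
        (cur, st.2 ++ [cur]))
      (begin_ids, [begin_ids])
    let sufSt := prompt_ids.reverse.foldl
      (fun (st : List Int × List (List Int)) tok =>
        let cur := tok :: st.1
        (cur, st.2 ++ [cur]))
      (middle_ids, [middle_ids])
    let suffixes := sufSt.2.reverse
    (PySem.List.enumerate L).foldl
      (fun acc ir =>
        acc ++ ir.2.map (fun tok =>
          PySem.List.pyGetD preSt.2 ir.1 [] ++ [tok] ++ PySem.List.pyGetD suffixes (ir.1 + 1) []))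
      []

-- ===== PRECONDITION & SPEC =====
-- Pre_ excludes exactly the inputs on which A raises IndexError: a nonempty replacement
-- list at an index ≥ len(prompt_ids).
def Pre_concat_user_ids (begin_ids : List Int) (prompt_ids : List Int) (middle_ids : List Int) (prompt_replace_lst : Option (List (List Int))) : Prop :=
  ∀ p ∈ (prompt_replace_lst.getD []).drop prompt_ids.length, p = []
instance (begin_ids : List Int) (prompt_ids : List Int) (middle_ids : List Int) (prompt_replace_lst : Option (List (List Int))) : Decidable (Pre_concat_user_ids begin_ids prompt_ids middle_ids prompt_replace_lst) := by unfold Pre_concat_user_ids; infer_instance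
def pvWitness_concat_user_ids : List Int × List Int × List Int × Option (List (List Int)) := ([1], [2, 3], [4], some [[9], [8, 7]])

def Spec_concat_user_ids (begin_ids : List Int) (prompt_ids : List Int) (middle_ids : List Int) (prompt_replace_lst : Option (List (List Int))) (out : List (List Int)) : Prop := out = concat_user_ids_alt begin_ids prompt_ids middle_ids prompt_replace_lst
instance (begin_ids : List Int) (prompt_ids : List Int) (middle_ids : List Int) (prompt_replace_lst : Option (List (List Int))) (out : List (List Int)) : Decidable (Spec_concat_user_ids begin_ids prompt_ids middle_ids prompt_replace_lst out) := by unfold Spec_concat_user_ids; infer_instance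

-- ===== CLAIM (what is proved, stated in full; the proofs are below) =====
def Claim_equal_concat_user_ids : Prop := ∀ (begin_ids : List Int) (prompt_ids : List Int) (middle_ids : List Int) (prompt_replace_lst : Option (List (List Int))), Dom_concat_user_ids begin_ids prompt_ids middle_ids prompt_replace_lst → Pre_concat_user_ids begin_ids prompt_ids middle_ids prompt_replace_lst → Spec_concat_user_ids begin_ids prompt_ids middle_ids prompt_replace_lst (concat_user_ids begin_ids prompt_ids middle_ids prompt_replace_lst)

-- ===== LEMMAS AND PROOFS =====

-- A's first loop appends prompt_ids elementwise and records consecutive width-1 slices.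
theorem concat_fold_spec (p : List Int) (u : List Int) (s : List (Nat × Nat)) :
    p.foldl
      (fun (acc : List Int × List (Nat × Nat)) id =>
        let v := acc.1 ++ [id]
        (v, acc.2 ++ [(acc.1.length, v.length)]))
      (u, s)
    = (u ++ p, s ++ (List.range p.length).map (fun i => (u.length + i, u.length + i + 1))) := by
  induction p generalizing u s with
  | nil => simp
  | cons a t ih =>
    rw [List.foldl_cons]
    show List.foldl _ (u ++ [a], s ++ [(u.length, (u ++ [a]).length)]) t = _
    rw [ih]
    refine Prod.ext (by simp) ?_
    simp only [List.length_append, List.length_cons, List.length_nil,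
      List.range_succ_eq_map, List.map_cons, List.map_map, List.append_assoc,
      List.cons_append, List.nil_append, Function.comp_def]
    refine congrArg _ (congrArg _ (List.map_congr_left fun i _ => ?_))
    refine Prod.ext (by simp; omega) (by simp; omega)

-- B's forward pass: the collected table holds u ++ p.take i for i = 0 … len(p).
theorem prefix_fold_spec (p : List Int) (u : List Int) (acc : List (List Int)) :
    p.foldl
      (fun (st : List Int × List (List Int)) tok =>
        let cur := st.1 ++ [tok]
        (cur, st.2 ++ [cur]))
      (u, acc)
    = (u ++ p, acc ++ (List.range p.length).map (fun i => u ++ p.take (i + 1))) := by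
  induction p generalizing u acc with
  | nil => simp
  | cons a t ih =>
    rw [List.foldl_cons]
    show List.foldl _ (u ++ [a], acc ++ [u ++ [a]]) t = _
    rw [ih]
    refine Prod.ext (by simp) ?_
    simp only [List.length_cons, List.range_succ_eq_map, List.map_cons, List.map_map,
      List.append_assoc, List.cons_append, List.nil_append, Function.comp_def,
      List.take_succ_cons, List.take_zero]

-- B's backward pass: the collected table holds (l.take (i+1)).reverse ++ c.
theorem suffix_fold_spec (l : List Int) (c : List Int) (acc : List (List Int)) :
    l.foldl
      (fun (st : List Int × List (List Int)) tok =>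
        let cur := tok :: st.1
        (cur, st.2 ++ [cur]))
      (c, acc)
    = (l.reverse ++ c, acc ++ (List.range l.length).map (fun i => (l.take (i + 1)).reverse ++ c)) := by
  induction l generalizing c acc with
  | nil => simp
  | cons a t ih =>
    rw [List.foldl_cons]
    show List.foldl _ (a :: c, acc ++ [a :: c]) t = _
    rw [ih]
    refine Prod.ext (by simp) ?_
    simp only [List.length_cons, List.range_succ_eq_map, List.map_cons, List.map_map,
      List.append_assoc, List.cons_append, List.nil_append, Function.comp_def,
      List.take_succ_cons, List.take_zero, List.reverse_cons, List.reverse_nil]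

-- the reversed suffix table, read front to back, is i ↦ p.drop i ++ m
theorem suffixes_spec (p m : List Int) :
    (([m] ++ (List.range p.length).map
        (fun i => (p.reverse.take (i + 1)).reverse ++ m))).reverse
    = (List.range (p.length + 1)).map (fun i => p.drop i ++ m) := by
  apply List.ext_getElem (by simp)
  intro k hk1 hk2
  simp only [List.length_reverse, List.length_append, List.length_map, List.length_range,
    List.length_cons, List.length_nil] at hk1
  rw [List.getElem_reverse]
  simp only [List.getElem_map, List.getElem_range]
  by_cases h0 : (1 + p.length) - 1 - k = 0
  · have hk : k = p.length := by omega
    simp only [List.length_append, List.length_map, List.length_range, List.length_cons,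
      List.length_nil] at *
    rw [List.getElem_append_left (by simp; omega)]
    simp [hk]
  · have hlt : (1 + p.length) - 1 - k - 1 < p.length := by omega
    rw [List.getElem_append_right (by simp; omega)]
    simp only [List.getElem_map, List.getElem_range, List.length_cons, List.length_nil]
    rw [List.reverse_take]
    simp only [List.reverse_reverse, List.length_reverse]
    congr 1
    congr 1
    simp only [List.length_append, List.length_map, List.length_range, List.length_cons,
      List.length_nil] at hk1 ⊢
    omega

theorem take_base (b p m : List Int) (k : Nat) (hk : k < p.length) :
    (b ++ p ++ m).take (b.length + k) = b ++ p.take k := by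
  rw [List.take_append, List.take_append]
  simp [List.take_of_length_le]
  omega

theorem drop_base (b p m : List Int) (k : Nat) (hk : k < p.length) :
    (b ++ p ++ m).drop (b.length + k + 1) = p.drop (k + 1) ++ m := by
  rw [List.drop_append, List.drop_append]
  have h1 : b.length + k + 1 - b.length = k + 1 := by omega
  have h2 : b.length + k + 1 - (b ++ p).length = 0 := by
    simp only [List.length_append]; omega
  rw [List.drop_of_length_le (show b.length ≤ b.length + k + 1 by omega), h2]
  simp [h1]

-- ===== VERDICT (by name: the statement is the Claim_ definition above) =====
theorem concat_user_ids_spec : Claim_equal_concat_user_ids := by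
  intro b p m r hdom hpre
  unfold Spec_concat_user_ids concat_user_ids concat_user_ids_alt
  simp only [concat_fold_spec, prefix_fold_spec, suffix_fold_spec]
  cases r with
  | none => simp
  | some L =>
    simp only [List.nil_append]
    simp only [List.length_reverse]
    rw [suffixes_spec p m]
    rw [PySem.List.foldl_append_eq_flatMap, PySem.List.foldl_append_eq_flatMap]
    simp only [List.nil_append, List.flatMap_def]
    congr 1
    refine List.map_congr_left ?_
    intro x hx
    rcases (PySem.List.mem_enumerate_iff L 0 x).1 hx with ⟨k, hkL, rfl⟩
    simp only [Int.zero_add] at *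
    by_cases hk : k < p.length
    · refine List.map_congr_left (fun tok _ => ?_)
      have hgetA : PySem.List.pyGetD
          ((List.range p.length).map (fun i => (b.length + i, b.length + i + 1))) (k : Int) (0, 0)
          = (b.length + k, b.length + k + 1) := by
        rw [PySem.List.pyGetD_natCast]
        rw [List.getD_eq_getElem _ _ (by simpa using hk)]
        simp
      have hgetP : PySem.List.pyGetD
          ([b] ++ (List.range p.length).map (fun i => b ++ p.take (i + 1))) (k : Int) []
          = b ++ p.take k := by
        rw [PySem.List.pyGetD_natCast]
        rw [List.getD_eq_getElem _ _ (by simp; omega)]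
        cases k with
        | zero => simp
        | succ j =>
          rw [List.getElem_append_right (by simp)]
          simp
      have hgetS : PySem.List.pyGetD
          ((List.range (p.length + 1)).map (fun i => p.drop i ++ m)) ((k : Int) + 1) []
          = p.drop (k + 1) ++ m := by
        have : ((k : Int) + 1) = (((k + 1 : Nat)) : Int) := by push_cast; ring
        rw [this, PySem.List.pyGetD_natCast]
        rw [List.getD_eq_getElem _ _ (by simp; omega)]
        simp
      rw [hgetA, hgetP, hgetS]
      simp only [← List.append_assoc]
      rw [take_base b p m k hk, drop_base b p m k hk]
      simp [List.append_assoc]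
    · have : L[k] = [] := by
        apply hpre
        refine List.mem_iff_getElem.2 ⟨k - p.length, by simp; omega, ?_⟩
        rw [List.getElem_drop]
        congr 1
        omega
      simp [this]
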